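-- pv_equiv track=rewrite | github.com/tianyich/programs | CMU Prec/hw4.py | longestCommonSubstring
-- ===== SOURCE A (Python) =====
-- def helperLongestSubstring(s1,s2):
--     commonSubstring=""
--     #find the shorter string
--     if(len(s1)>len(s2)):
--         shorter=s2
--     else:
--         shorter=s1
--     for i in range(len(shorter)):
--         if s1[i]==s2[i]:
--             commonSubstring+=s1[i]
--         else:
--             return commonSubstring
--     return commonSubstring
--
-- def longestCommonSubstring(s1, s2):
--     longestSubstring=""
--     for i in range(len(s1)):
--         for j in range(len(s2)):
--             #cut the first letter in each string each time, and call the helper function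
--             substringInCommon=helperLongestSubstring(s1[i:],s2[j:]);
--             if len(substringInCommon)>len(longestSubstring):
--                 longestSubstring=substringInCommon
--             if len(substringInCommon)==len(longestSubstring):
--                 if(substringInCommon<longestSubstring):
--                     longestSubstring=substringInCommon
--
--     return longestSubstring
-- ===== SOURCE B (Python) =====
-- def longestCommonSubstring(s1, s2):
--     m = len(s2)
--     best = ""
--     nxt = [0] * (m + 1)
--     for i in range(len(s1) - 1, -1, -1):
--         c = s1[i]
--         row = [nxt[j + 1] + 1 if c == s2[j] else 0 for j in range(m)]
--         for j in range(m):
--             k = row[j]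
--             if k > len(best) or (k == len(best) and s1[i:i + k] < best):
--                 best = s1[i:i + k]
--         nxt = row + [0]
--     return best
-- ===== Notes on version B (the rewrite author's own statement) =====
-- stated objective: faster
-- what changed: A recomputes a character-by-character common prefix for every (i,j) pair of suffix starts; B fills the classical suffix-match-length DP table row by row (keeping one row), so each cell costs O(1) and the longest, lexicographically smallest match is tracked online.
import Mathlib
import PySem

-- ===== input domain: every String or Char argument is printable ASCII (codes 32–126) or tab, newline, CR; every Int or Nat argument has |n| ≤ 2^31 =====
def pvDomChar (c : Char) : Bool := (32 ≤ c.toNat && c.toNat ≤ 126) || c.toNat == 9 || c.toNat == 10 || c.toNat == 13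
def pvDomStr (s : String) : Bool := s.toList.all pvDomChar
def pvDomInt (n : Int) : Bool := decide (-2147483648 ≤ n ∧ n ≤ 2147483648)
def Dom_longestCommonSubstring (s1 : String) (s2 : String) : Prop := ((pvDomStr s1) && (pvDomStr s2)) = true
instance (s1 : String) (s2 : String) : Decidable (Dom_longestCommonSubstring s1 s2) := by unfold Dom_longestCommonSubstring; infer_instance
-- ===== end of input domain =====

-- B replaces A's O(n·m·min(n,m)) all-pairs common-prefix scan by the classical O(n·m)
-- suffix-match-length DP table (one row kept), tracking the longest, lexicographically
-- smallest match online.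

-- ===== PORT A =====
-- helperLongestSubstring: character-by-character common prefix with early return
def helperA : List Char → List Char → List Char
  | a :: as, b :: bs => if a == b then a :: helperA as bs else []
  | _, _ => []

def longestCommonSubstring (s1 : String) (s2 : String) : String :=
  let l1 := s1.toList
  let l2 := s2.toList
  String.ofList <|
    (List.range l1.length).foldl (fun longest i =>
      (List.range l2.length).foldl (fun longest j =>
        let sub := helperA (l1.drop i) (l2.drop j)
        let longest := if sub.length > longest.length then sub else longest
        let longest :=
          if sub.length = longest.length then
            if decide (sub < longest) then sub else longest
          else longest
        longest) longest) []

-- ===== PORT B =====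
-- dpB processes s1 from its last character to its first (the Python loop
-- 'for i in range(len(s1)-1, -1, -1)'), returning (nxt row of the DP table, best so far).
def dpB : List Char → List Char → List Nat × List Char
  | [], l2 => (List.replicate (l2.length + 1) 0, [])
  | c :: rest, l2 =>
    let p := dpB rest l2
    -- row = [nxt[j+1] + 1 if c == s2[j] else 0 for j in range(m)]
    let row := List.zipWith (fun b x => if c == b then x + 1 else 0) l2 p.1.tail
    -- for j in range(m): k = row[j]; update best
    let best := row.foldl (fun best k =>
      if k > best.length ∨ (k = best.length ∧ decide ((c :: rest).take k < best)) then
        (c :: rest).take k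
      else best) p.2
    (row ++ [0], best)

def longestCommonSubstring_alt (s1 : String) (s2 : String) : String :=
  String.ofList (dpB s1.toList s2.toList).2

-- ===== PRECONDITION & SPEC =====
def Spec_longestCommonSubstring (s1 : String) (s2 : String) (out : String) : Prop := out = longestCommonSubstring_alt s1 s2
instance (s1 : String) (s2 : String) (out : String) : Decidable (Spec_longestCommonSubstring s1 s2 out) := by unfold Spec_longestCommonSubstring; infer_instance

-- ===== CLAIM (what is proved, stated in full; the proofs are below) =====
def Claim_equal_longestCommonSubstring : Prop := ∀ (s1 : String) (s2 : String), Dom_longestCommonSubstring s1 s2 → Spec_longestCommonSubstring s1 s2 (longestCommonSubstring s1 s2)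

-- ===== LEMMAS AND PROOFS =====

-- 'x is a strictly better answer than y': longer, or same length and lexicographically smaller.
abbrev Better (x y : List Char) : Prop := y.length < x.length ∨ (x.length = y.length ∧ x < y)

-- the common step both ports perform: keep the better of the two
def step (best x : List Char) : List Char := if Better x best then x else best

theorem better_trans {x y z : List Char} (h1 : Better x y) (h2 : Better y z) : Better x z := by
  rcases h1 with h1 | ⟨h1, h1'⟩ <;> rcases h2 with h2 | ⟨h2, h2'⟩
  · exact Or.inl (by omega)
  · exact Or.inl (by omega)
  · exact Or.inl (by omega)
  · exact Or.inr ⟨by omega, lt_trans h1' h2'⟩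

theorem better_total {x y : List Char} (h1 : ¬ Better x y) (h2 : ¬ Better y x) : x = y := by
  unfold Better at h1 h2
  push Not at h1 h2
  have hlen : x.length = y.length := le_antisymm h1.1 h2.1
  exact le_antisymm (h2.2 hlen.symm) (h1.2 hlen)

-- result of folding `step` is a member of the start-cons-list and no member beats it
theorem foldl_step_min (l : List (List Char)) : ∀ a : List Char,
    (l.foldl step a) ∈ a :: l ∧ ∀ x ∈ a :: l, ¬ Better x (l.foldl step a) := by
  induction l with
  | nil =>
    intro a
    refine ⟨List.mem_singleton.mpr rfl, ?_⟩
    intro x hx h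
    rw [List.mem_singleton] at hx
    subst hx
    simp only [List.foldl_nil, Better] at h
    rcases h with h | ⟨_, h⟩
    · omega
    · exact lt_irrefl _ h
  | cons y l ih =>
    intro a
    by_cases hb : Better y a
    · have hs : step a y = y := by simp [step, hb]
      rw [List.foldl_cons, hs]
      obtain ⟨hmem, hmin⟩ := ih y
      refine ⟨List.mem_cons.mpr (Or.inr hmem), ?_⟩
      intro x hx
      rcases List.mem_cons.mp hx with rfl | hx'
      · intro h
        exact hmin y List.mem_cons_self (better_trans hb h)
      · exact hmin x hx'
    · have hs : step a y = a := by simp [step, hb]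
      rw [List.foldl_cons, hs]
      obtain ⟨hmem, hmin⟩ := ih a
      refine ⟨?_, ?_⟩
      · rcases List.mem_cons.mp hmem with he | hm
        · rw [he]; exact List.mem_cons_self
        · exact List.mem_cons.mpr (Or.inr (List.mem_cons.mpr (Or.inr hm)))
      · intro x hx
        rcases List.mem_cons.mp hx with he | hx'
        · subst he
          exact hmin _ List.mem_cons_self
        · rcases List.mem_cons.mp hx' with he | hx''
          · subst he
            by_cases hab : Better a x
            · intro h
              exact hmin a List.mem_cons_self (better_trans hab h)
            · have : a = x := better_total hab hb
              rw [← this]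
              exact hmin a List.mem_cons_self
          · exact hmin x (List.mem_cons.mpr (Or.inr hx''))

theorem stepA_eq (best sub : List Char) :
    (let l1 := if sub.length > best.length then sub else best
     if sub.length = l1.length then (if decide (sub < l1) then sub else l1) else l1)
    = step best sub := by
  simp only [step, Better, gt_iff_lt, decide_eq_true_eq]
  split_ifs <;> first | rfl | omega | tauto

-- helperA produces a prefix of its first argument
theorem helperA_prefix : ∀ u v : List Char, helperA u v <+: u := by
  intro u
  induction u with
  | nil => intro v; cases v <;> simp [helperA]
  | cons a as ih =>
    intro v
    cases v with
    | nil => simp [helperA]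
    | cons b bs =>
      simp only [helperA]
      by_cases h : a = b
      · simp only [h, BEq.rfl, if_true]
        exact List.cons_prefix_cons.mpr ⟨rfl, ih bs⟩
      · simp [h]

theorem take_length_helperA (u v : List Char) : u.take (helperA u v).length = helperA u v :=
  (List.prefix_iff_eq_take.mp (helperA_prefix u v)).symm

theorem helperA_nil_right (u : List Char) : helperA u [] = [] := by cases u <;> rfl

-- the DP row is exactly the common-prefix lengths of the current s1-suffix against every s2-suffix
theorem dpB_row (l2 : List Char) : ∀ u : List Char,
    (dpB u l2).1 = (List.range (l2.length + 1)).map (fun j => (helperA u (l2.drop j)).length) := by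
  intro u
  induction u with
  | nil =>
    apply List.ext_getElem
    · simp [dpB]
    · intro n h1 h2
      simp only [dpB, List.getElem_replicate, List.getElem_map, List.getElem_range]
      cases l2.drop n <;> simp [helperA]
  | cons c rest ih =>
    simp only [dpB, ih]
    have htail : ((List.range (l2.length + 1)).map
        (fun j => (helperA rest (l2.drop j)).length)).tail
        = (List.range l2.length).map (fun j => (helperA rest (l2.drop (j + 1))).length) := by
      rw [List.range_succ_eq_map]
      simp [List.map_map, Function.comp_def]
    rw [htail]
    apply List.ext_getElem
    · simp [List.length_zipWith]
    · intro n h1 h2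
      simp only [List.getElem_map, List.getElem_range]
      rcases Nat.lt_or_ge n l2.length with hn | hn
      · rw [List.getElem_append_left (by simp [List.length_zipWith]; omega)]
        rw [List.getElem_zipWith]
        have hdrop : l2.drop n = l2[n] :: l2.drop (n + 1) := List.drop_eq_getElem_cons hn
        rw [hdrop]
        simp only [helperA, List.getElem_map, List.getElem_range]
        by_cases h : c == l2[n] <;> simp [h]
      · have hlen : (List.zipWith (fun b x => if c == b then x + 1 else 0) l2
            ((List.range l2.length).map (fun j => (helperA rest (l2.drop (j + 1))).length))).length = l2.length := by
          simp [List.length_zipWith]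
        have hn' : n = l2.length := by
          simp only [List.length_append, hlen, List.length_cons, List.length_nil] at h1
          omega
        subst hn'
        rw [List.getElem_append_right (by omega)]
        simp [List.drop_length, helperA_nil_right]

-- flattened candidate list of A
def candsA (l1 l2 : List Char) : List (List Char) :=
  (List.range l1.length).flatMap (fun i =>
    (List.range l2.length).map (fun j => helperA (l1.drop i) (l2.drop j)))

-- flattened candidate list of B, in B's traversal order
def candsB (l2 : List Char) : List Char → List (List Char)
  | [] => []
  | c :: rest =>
    candsB l2 rest ++ (List.range l2.length).map (fun j => helperA (c :: rest) (l2.drop j))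

theorem A_eq_fold (l1 l2 : List Char) :
    (List.range l1.length).foldl (fun longest i =>
      (List.range l2.length).foldl (fun longest j =>
        let sub := helperA (l1.drop i) (l2.drop j)
        let longest := if sub.length > longest.length then sub else longest
        let longest :=
          if sub.length = longest.length then
            if decide (sub < longest) then sub else longest
          else longest
        longest) longest) []
    = (candsA l1 l2).foldl step [] := by
  unfold candsA
  rw [List.foldl_flatMap]
  congr 1
  funext acc i
  rw [List.foldl_map]
  congr 1
  funext best j
  exact stepA_eq best (helperA (l1.drop i) (l2.drop j))

theorem B_eq_fold (l2 : List Char) : ∀ u : List Char,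
    (dpB u l2).2 = (candsB l2 u).foldl step [] := by
  intro u
  induction u with
  | nil => rfl
  | cons c rest ih =>
    show (List.zipWith _ l2 (dpB rest l2).1.tail).foldl _ (dpB rest l2).2 = _
    have hrow : List.zipWith (fun b x => if c == b then x + 1 else 0) l2 (dpB rest l2).1.tail
        = (List.range l2.length).map (fun j => (helperA (c :: rest) (l2.drop j)).length) := by
      rw [dpB_row l2 rest]
      have htail : ((List.range (l2.length + 1)).map
          (fun j => (helperA rest (l2.drop j)).length)).tail
          = (List.range l2.length).map (fun j => (helperA rest (l2.drop (j + 1))).length) := by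
        rw [List.range_succ_eq_map]
        simp [List.map_map, Function.comp_def]
      rw [htail]
      apply List.ext_getElem
      · simp [List.length_zipWith]
      · intro n h1 h2
        rw [List.getElem_zipWith]
        have hn : n < l2.length := by simpa [List.length_zipWith] using h1
        have hdrop : l2.drop n = l2[n] :: l2.drop (n + 1) := List.drop_eq_getElem_cons hn
        simp only [List.getElem_map, List.getElem_range, hdrop, helperA]
        by_cases h : c == l2[n] <;> simp [h]
    rw [hrow, List.foldl_map]
    have hc : candsB l2 (c :: rest)
        = candsB l2 rest ++ (List.range l2.length).map (fun j => helperA (c :: rest) (l2.drop j)) := rfl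
    rw [hc, List.foldl_append, List.foldl_map, ih]
    congr 1
    funext best j
    have hk := take_length_helperA (c :: rest) (l2.drop j)
    simp only [hk, step, Better, gt_iff_lt, decide_eq_true_eq]

-- the two candidate lists have the same elements (up to order and multiplicity)
theorem mem_candsB_iff (l1 l2 : List Char) (x : List Char) :
    x ∈ candsB l2 l1 ↔ ∃ i < l1.length, ∃ j < l2.length, x = helperA (l1.drop i) (l2.drop j) := by
  induction l1 with
  | nil => simp [candsB]
  | cons c rest ih =>
    simp only [candsB, List.mem_append, ih, List.mem_map, List.mem_range]
    constructor
    · rintro (⟨i, hi, j, hj, rfl⟩ | ⟨j, hj, rfl⟩)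
      · exact ⟨i + 1, by simp; omega, j, hj, by simp⟩
      · exact ⟨0, by simp, j, hj, by simp⟩
    · rintro ⟨i, hi, j, hj, rfl⟩
      cases i with
      | zero => exact Or.inr ⟨j, hj, by simp⟩
      | succ i' => exact Or.inl ⟨i', by simp at hi; omega, j, hj, by simp⟩

theorem mem_candsA_iff (l1 l2 : List Char) (x : List Char) :
    x ∈ candsA l1 l2 ↔ ∃ i < l1.length, ∃ j < l2.length, x = helperA (l1.drop i) (l2.drop j) := by
  simp only [candsA, List.mem_flatMap, List.mem_map, List.mem_range]
  constructor
  · rintro ⟨i, hi, j, hj, rfl⟩; exact ⟨i, hi, j, hj, rfl⟩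
  · rintro ⟨i, hi, j, hj, rfl⟩; exact ⟨i, hi, ⟨j, hj, rfl⟩⟩

-- two minima of membership-equivalent cons-lists are equal
theorem fold_min_unique (la lb : List (List Char))
    (h : ∀ x, x ∈ ([] : List Char) :: la ↔ x ∈ ([] : List Char) :: lb) :
    la.foldl step [] = lb.foldl step [] := by
  obtain ⟨hma, hmina⟩ := foldl_step_min la []
  obtain ⟨hmb, hminb⟩ := foldl_step_min lb []
  apply better_total
  · exact hminb _ ((h _).mp hma)
  · exact hmina _ ((h _).mpr hmb)

-- ===== VERDICT (by name: the statement is the Claim_ definition above) =====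
theorem longestCommonSubstring_spec : Claim_equal_longestCommonSubstring := by
  intro s1 s2 _
  unfold Spec_longestCommonSubstring longestCommonSubstring longestCommonSubstring_alt
  simp only []
  rw [A_eq_fold s1.toList s2.toList, B_eq_fold s2.toList s1.toList]
  congr 1
  apply fold_min_unique
  intro x
  simp only [List.mem_cons, mem_candsA_iff, mem_candsB_iff]
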